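-- pv_equiv track=rewrite | github.com/dshuhler/codility_lessons | codility/5_prefix_sums/genomic_range_query.py | build_nucleotide_sums
-- ===== SOURCE A (Python) =====
-- def build_nucleotide_sums(nucleotides):
--     nucleotide_sums = [[0] * 4 for x in range(len(nucleotides))]
--     for i, nucleotide_char in enumerate(nucleotides):
--         if nucleotide_char == "A":
--             nucleotide_sums[i][0] = 1
--         if nucleotide_char == "C":
--             nucleotide_sums[i][1] = 1
--         if nucleotide_char == "G":
--             nucleotide_sums[i][2] = 1
--         if nucleotide_char == "T":
--             nucleotide_sums[i][3] = 1
--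
--     for i in range(1, len(nucleotides)):
--         for j in range(4):
--             nucleotide_sums[i][j] += nucleotide_sums[i-1][j]
--
--     return nucleotide_sums
-- ===== SOURCE B (Python) =====
-- def build_nucleotide_sums(nucleotides):
--     index = {"A": 0, "C": 1, "G": 2, "T": 3}
--     running = [0, 0, 0, 0]
--     rows = []
--     for ch in nucleotides:
--         j = index.get(ch)
--         if j is not None:
--             running[j] += 1
--         rows.append(list(running))
--     return rows
-- ===== Notes on version B (the rewrite author's own statement) =====
-- stated objective: simpler
-- what changed: Replaces the two-pass construction (indicator table fill, then in-place cumulative addition loop) with a single pass keeping one running count vector and appending a copy per character.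
import Mathlib
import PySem

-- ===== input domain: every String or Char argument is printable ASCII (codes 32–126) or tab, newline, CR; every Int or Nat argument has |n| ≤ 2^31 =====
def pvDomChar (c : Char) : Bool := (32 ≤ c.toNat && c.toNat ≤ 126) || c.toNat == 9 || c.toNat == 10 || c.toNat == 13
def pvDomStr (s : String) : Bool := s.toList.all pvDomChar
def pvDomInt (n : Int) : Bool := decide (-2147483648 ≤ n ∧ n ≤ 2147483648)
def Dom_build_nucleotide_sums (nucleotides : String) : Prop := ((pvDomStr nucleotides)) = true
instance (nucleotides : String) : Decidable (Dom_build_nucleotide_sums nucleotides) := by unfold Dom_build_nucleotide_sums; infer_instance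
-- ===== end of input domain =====

-- B replaces A's two passes (indicator-row fill, then in-place cumulative addition) by a
-- single pass with one running count vector, appending a copy per character (objective: simpler).

-- ===== PORT A =====
-- row built for position i by the first loop (four independent ifs on the char)
def pvIndicator (c : Char) : List Int :=
  let r : List Int := [0, 0, 0, 0]
  let r := if c == 'A' then r.set 0 1 else r
  let r := if c == 'C' then r.set 1 1 else r
  let r := if c == 'G' then r.set 2 1 else r
  let r := if c == 'T' then r.set 3 1 else r
  r

-- body of the second loop: for j in range(4): sums[i][j] += sums[i-1][j]
def pvAccRow (rows : List (List Int)) (i : Int) : List (List Int) :=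
  rows.set i.toNat
    ((List.range 4).foldl
      (fun r j => r.set j (r.getD j 0 + (rows.getD (i - 1).toNat []).getD j 0))
      (rows.getD i.toNat []))

def build_nucleotide_sums (nucleotides : String) : List (List Int) :=
  let sums := nucleotides.toList.map pvIndicator
  (PySem.List.pyRange 1 (nucleotides.toList.length : Int) 1).foldl pvAccRow sums

-- ===== PORT B =====
def pvIdxDict : PySem.Dict Char Int := PySem.Dict.ofList [('A', 0), ('C', 1), ('G', 2), ('T', 3)]

def build_nucleotide_sums_alt (nucleotides : String) : List (List Int) :=
  (nucleotides.toList.foldl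
    (fun (st : List Int × List (List Int)) ch =>
      let running :=
        match PySem.Dict.get? pvIdxDict ch with
        | some j => st.1.set j.toNat (st.1.getD j.toNat 0 + 1)
        | none => st.1
      (running, st.2 ++ [running]))
    ([0, 0, 0, 0], [])).2

-- ===== PRECONDITION & SPEC =====
def Spec_build_nucleotide_sums (nucleotides : String) (out : List (List Int)) : Prop := out = build_nucleotide_sums_alt nucleotides
instance (nucleotides : String) (out : List (List Int)) : Decidable (Spec_build_nucleotide_sums nucleotides out) := by unfold Spec_build_nucleotide_sums; infer_instance

-- ===== CLAIM (what is proved, stated in full; the proofs are below) =====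
def Claim_equal_build_nucleotide_sums : Prop := ∀ (nucleotides : String), Dom_build_nucleotide_sums nucleotides → Spec_build_nucleotide_sums nucleotides (build_nucleotide_sums nucleotides)

-- ===== LEMMAS AND PROOFS =====

-- reference function: inclusive prefix sums of the indicator rows
def pvAdd4 (a b : List Int) : List Int := List.zipWith (· + ·) a b

def pvCum (acc : List Int) : List Char → List (List Int)
  | [] => []
  | c :: cs => let a := pvAdd4 acc (pvIndicator c); a :: pvCum a cs

def pvSum4 (acc : List Int) (l : List Char) : List Int :=
  l.foldl (fun a c => pvAdd4 a (pvIndicator c)) acc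

lemma pvExists4 (x : List Int) (h : x.length = 4) : ∃ a b c d : Int, x = [a, b, c, d] := by
  match x, h with
  | [a, b, c, d], _ => exact ⟨a, b, c, d, rfl⟩

lemma pvIndicator_len (c : Char) : (pvIndicator c).length = 4 := by
  unfold pvIndicator; dsimp only; split_ifs <;> rfl

lemma pvZero_add4 (x : List Int) (hx : x.length = 4) : pvAdd4 [0, 0, 0, 0] x = x := by
  match x, hx with
  | [a, b, c, d], _ => simp [pvAdd4]

-- B's dict-branch step is exactly add-the-indicator
lemma pvStep_running (ch : Char) (a b c d : Int) :
    (match PySem.Dict.get? pvIdxDict ch with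
      | some j => ([a, b, c, d] : List Int).set j.toNat (([a, b, c, d] : List Int).getD j.toNat 0 + 1)
      | none => ([a, b, c, d] : List Int))
    = pvAdd4 [a, b, c, d] (pvIndicator ch) := by
  by_cases hA : ch = 'A'
  · subst hA; rw [show PySem.Dict.get? pvIdxDict 'A' = some 0 from rfl]
    simp [pvIndicator, pvAdd4]
  by_cases hC : ch = 'C'
  · subst hC; rw [show PySem.Dict.get? pvIdxDict 'C' = some 1 from rfl]
    simp [pvIndicator, pvAdd4]
  by_cases hG : ch = 'G'
  · subst hG; rw [show PySem.Dict.get? pvIdxDict 'G' = some 2 from rfl]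
    simp [pvIndicator, pvAdd4]
  by_cases hT : ch = 'T'
  · subst hT; rw [show PySem.Dict.get? pvIdxDict 'T' = some 3 from rfl]
    simp [pvIndicator, pvAdd4]
  · have hmk : pvIdxDict = PySem.Dict.mk [('A', (0 : Int)), ('C', 1), ('G', 2), ('T', 3)] := by decide
    have hnone : PySem.Dict.get? pvIdxDict ch = none := by
      rw [hmk]
      simp [PySem.Dict.get?, Ne.symm hA, Ne.symm hC, Ne.symm hG, Ne.symm hT]
    rw [hnone]
    simp [pvIndicator, pvAdd4, hA, hC, hG, hT]

-- B's fold produces the prefix-sum rows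
lemma pvAlt_inv (l : List Char) : ∀ (a b c d : Int) (rows : List (List Int)),
    (l.foldl
      (fun (st : List Int × List (List Int)) ch =>
        let running :=
          match PySem.Dict.get? pvIdxDict ch with
          | some j => st.1.set j.toNat (st.1.getD j.toNat 0 + 1)
          | none => st.1
        (running, st.2 ++ [running]))
      ([a, b, c, d], rows)).2 = rows ++ pvCum [a, b, c, d] l := by
  induction l with
  | nil => intro a b c d rows; simp [pvCum]
  | cons ch cs ih =>
    intro a b c d rows
    have hrun := pvStep_running ch a b c d
    have h4 : (pvAdd4 [a, b, c, d] (pvIndicator ch)).length = 4 := by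
      have := pvIndicator_len ch
      simp [pvAdd4, this]
    obtain ⟨a', b', c', d', he⟩ := pvExists4 _ h4
    simp only [List.foldl_cons, hrun, he, pvCum]
    rw [ih a' b' c' d']
    simp

lemma pvAlt_eq (s : String) : build_nucleotide_sums_alt s = pvCum [0, 0, 0, 0] s.toList := by
  unfold build_nucleotide_sums_alt
  rw [pvAlt_inv]
  simp

-- properties of pvCum
lemma pvCum_length (acc : List Int) (l : List Char) : (pvCum acc l).length = l.length := by
  induction l generalizing acc with
  | nil => rfl
  | cons c cs ih => simp [pvCum, ih]

lemma pvCum_append (acc : List Int) (l l' : List Char) :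
    pvCum acc (l ++ l') = pvCum acc l ++ pvCum (pvSum4 acc l) l' := by
  induction l generalizing acc with
  | nil => simp [pvCum, pvSum4]
  | cons c cs ih => simp [pvCum, pvSum4, ih, List.foldl_cons]

lemma pvCum_last (l : List Char) (hl : l ≠ []) (acc : List Int) :
    (pvCum acc l).getD (l.length - 1) [] = pvSum4 acc l := by
  induction l generalizing acc with
  | nil => simp at hl
  | cons c cs ih =>
    cases cs with
    | nil => simp [pvCum, pvSum4]
    | cons c' cs' =>
      simp only [pvCum, pvSum4, List.foldl_cons]
      have := ih (by simp) (pvAdd4 acc (pvIndicator c))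
      simpa [pvSum4, List.length_cons] using this

lemma pvCum_len4 (acc : List Int) (hacc : acc.length = 4) (l : List Char) :
    ∀ r ∈ pvCum acc l, r.length = 4 := by
  induction l generalizing acc with
  | nil => simp [pvCum]
  | cons c cs ih =>
    intro r hr
    have h4 : (pvAdd4 acc (pvIndicator c)).length = 4 := by
      simp [pvAdd4, hacc, pvIndicator_len]
    simp only [pvCum, List.mem_cons] at hr
    rcases hr with rfl | hr
    · exact h4
    · exact ih _ h4 r hr

-- the inner j-loop is elementwise addition on length-4 rows
lemma pvInner_add (a b c d p q r s : Int) :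
    (List.range 4).foldl
      (fun (x : List Int) j => x.set j (x.getD j 0 + ([p, q, r, s] : List Int).getD j 0))
      [a, b, c, d] = pvAdd4 [a, b, c, d] [p, q, r, s] := by
  rfl

-- pvAccRow at index i < rows.length only touches the first rows.length entries
lemma pvAccRow_append (rows : List (List Int)) (x : List Int) (i : Int)
    (h0 : 1 ≤ i) (h : i.toNat < rows.length) :
    pvAccRow (rows ++ [x]) i = pvAccRow rows i ++ [x] := by
  unfold pvAccRow
  have h1 : (i - 1).toNat < rows.length := by omega
  rw [List.getD_append _ _ _ _ h, List.getD_append _ _ _ _ h1,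
    List.set_append_left _ _ h]

lemma pvAccRow_length (rows : List (List Int)) (i : Int) :
    (pvAccRow rows i).length = rows.length := by
  unfold pvAccRow; simp

lemma pvFold_append (idxs : List Int) : ∀ (rows : List (List Int)) (x : List Int),
    (∀ i ∈ idxs, 1 ≤ i ∧ i.toNat < rows.length) →
    idxs.foldl pvAccRow (rows ++ [x]) = idxs.foldl pvAccRow rows ++ [x] := by
  induction idxs with
  | nil => intro rows x _; rfl
  | cons i is ih =>
    intro rows x h
    have hi := h i (List.mem_cons_self)
    simp only [List.foldl_cons]
    rw [pvAccRow_append rows x i hi.1 hi.2]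
    exact ih _ x (fun j hj => by
      have := h j (List.mem_cons_of_mem _ hj)
      simpa [pvAccRow_length] using this)

-- A's two passes compute the prefix-sum rows
lemma pvA_loop (l : List Char) :
    (PySem.List.pyRange 1 (l.length : Int) 1).foldl pvAccRow (l.map pvIndicator)
      = pvCum [0, 0, 0, 0] l := by
  induction l using List.reverseRecOn with
  | nil => simp [PySem.List.pyRange_one_eq_nil, pvCum]
  | append_singleton l' c ih =>
    cases l' with
    | nil =>
      simp only [List.nil_append, List.map_cons, List.map_nil, List.length_cons, List.length_nil]
      rw [PySem.List.pyRange_one_eq_nil (by norm_num)]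
      simp [pvCum, pvZero_add4 _ (pvIndicator_len c)]
    | cons c0 cs =>
      set l := c0 :: cs with hl
      have hm : (1 : Int) ≤ (l.length : Int) := by simp [hl]
      have hsplit : PySem.List.pyRange 1 ((l ++ [c]).length : Int) 1
          = PySem.List.pyRange 1 (l.length : Int) 1 ++ [(l.length : Int)] := by
        have : ((l ++ [c]).length : Int) = (l.length : Int) + 1 := by simp
        rw [this, PySem.List.pyRange_one_succ_right hm]
      rw [hsplit, List.map_append, List.foldl_append]
      have hbounds : ∀ i ∈ PySem.List.pyRange 1 (l.length : Int) 1,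
          1 ≤ i ∧ i.toNat < (l.map pvIndicator).length := by
        intro i hi
        rw [PySem.List.mem_pyRange_one] at hi
        constructor
        · exact hi.1
        · simp only [List.length_map]; omega
      simp only [List.map_cons, List.map_nil]
      rw [pvFold_append _ _ _ hbounds]
      rw [ih]
      -- now one pvAccRow step at index l.length on pvCum [0,0,0,0] l ++ [pvIndicator c]
      have hlen : (pvCum [0, 0, 0, 0] l).length = l.length := pvCum_length _ _
      have hne : l ≠ [] := by simp [hl]
      have hlpos : 1 ≤ l.length := by simp [hl]
      simp only [List.foldl_cons, List.foldl_nil]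
      unfold pvAccRow
      have hnat : ((l.length : Int)).toNat = l.length := by simp
      have hnat1 : (((l.length : Int)) - 1).toNat = l.length - 1 := by omega
      rw [hnat, hnat1]
      have hgd1 : (pvCum [0, 0, 0, 0] l ++ [pvIndicator c]).getD l.length [] = pvIndicator c := by
        rw [List.getD_eq_getElem?_getD, List.getElem?_append_right (by omega)]
        simp [hlen]
      have hgd2 : (pvCum [0, 0, 0, 0] l ++ [pvIndicator c]).getD (l.length - 1) [] = pvSum4 [0, 0, 0, 0] l := by
        rw [List.getD_append _ _ _ _ (by omega), pvCum_last l hne]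
      rw [hgd1, hgd2]
      have hsl : (pvSum4 [0, 0, 0, 0] l).length = 4 := by
        have : pvSum4 [0, 0, 0, 0] l ∈ pvCum [0, 0, 0, 0] l := by
          rw [← pvCum_last l hne, List.getD_eq_getElem _ _ (by omega)]
          exact List.getElem_mem _
        exact pvCum_len4 _ rfl _ _ this
      obtain ⟨p, q, r, s, hps⟩ := pvExists4 _ hsl
      obtain ⟨a, b, c2, d, hic⟩ := pvExists4 _ (pvIndicator_len c)
      rw [hps, hic, pvInner_add]
      have hset : (pvCum [0, 0, 0, 0] l ++ [[a, b, c2, d]]).set l.length (pvAdd4 [a, b, c2, d] [p, q, r, s])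
          = pvCum [0, 0, 0, 0] l ++ [pvAdd4 [a, b, c2, d] [p, q, r, s]] := by
        rw [List.set_append_right _ _ (by omega)]
        simp [hlen]
      rw [hset, pvCum_append]
      congr 1
      simp only [pvCum, hps]
      have : pvAdd4 [a, b, c2, d] [p, q, r, s] = pvAdd4 [p, q, r, s] (pvIndicator c) := by
        rw [hic]; simp [pvAdd4]; constructor <;> [ring; constructor <;> [ring; constructor <;> ring]]
      rw [this]

lemma pvA_eq (sstr : String) : build_nucleotide_sums sstr = pvCum [0, 0, 0, 0] sstr.toList := by
  unfold build_nucleotide_sums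
  exact pvA_loop sstr.toList

-- ===== VERDICT (by name: the statement is the Claim_ definition above) =====
theorem build_nucleotide_sums_spec : Claim_equal_build_nucleotide_sums := by
  intro s _
  unfold Spec_build_nucleotide_sums
  rw [pvA_eq, pvAlt_eq]
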